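-- pv_equiv track=rewrite | github.com/glyphic-sentry/record-collection | backend/image_cache.py | _choose_images_from_release_payload
-- ===== SOURCE A (Python) =====
-- from typing import Optional, Tuple, List
--
-- def _choose_images_from_release_payload(images: List[dict]) -> Tuple[Optional[str], Optional[str]]:
--     """
--     Given Discogs 'images' payload, pick best (front, back) URLs.
--     - front: prefer type=='primary', else first image
--     - back:  prefer items that look like back/rear, else a 'secondary' image
--     Returns (front_url, back_url_or_None)
--     """
--     if not images:
--         return None, None
--
--     # front
--     primaries = [img for img in images if img.get("type") == "primary"]
--     if primaries:
--         front = primaries[0].get("resource_url") or primaries[0].get("uri")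
--     else:
--         front = images[0].get("resource_url") or images[0].get("uri")
--
--     # back
--     def looks_back(img: dict) -> bool:
--         s = (img.get("resource_url") or img.get("uri") or "").lower()
--         return ("back" in s) or ("rear" in s)
--
--     back_url = None
--     hinted = [img for img in images if looks_back(img)]
--     if hinted:
--         back_url = hinted[0].get("resource_url") or hinted[0].get("uri")
--     else:
--         secondaries = [img for img in images if img.get("type") == "secondary"]
--         if secondaries:
--             back_url = secondaries[0].get("resource_url") or secondaries[0].get("uri")
--
--     return front, back_url
-- ===== SOURCE B (Python) =====
-- from typing import Optional, Tuple, List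
--
-- def _choose_images_from_release_payload(images: List[dict]) -> Tuple[Optional[str], Optional[str]]:
--     if not images:
--         return None, None
--
--     first_primary = None
--     first_hinted = None
--     first_secondary = None
--     for img in images:
--         t = img.get("type")
--         if first_primary is None and t == "primary":
--             first_primary = img
--         if first_hinted is None:
--             s = (img.get("resource_url") or img.get("uri") or "").lower()
--             if "back" in s or "rear" in s:
--                 first_hinted = img
--         if first_secondary is None and t == "secondary":
--             first_secondary = img
--
--     def url(img):
--         return img.get("resource_url") or img.get("uri")
--
--     front = url(first_primary if first_primary is not None else images[0])
--     back_src = first_hinted if first_hinted is not None else first_secondary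
--     back_url = url(back_src) if back_src is not None else None
--     return front, back_url
-- ===== Notes on version B (the rewrite author's own statement) =====
-- stated objective: simpler
-- what changed: Replaced A's three separate full filter passes (primaries, back/rear-hinted, secondaries) by one left-to-right loop that records the first primary, first hinted and first secondary image, then derives front/back URLs from those references.
import Mathlib
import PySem

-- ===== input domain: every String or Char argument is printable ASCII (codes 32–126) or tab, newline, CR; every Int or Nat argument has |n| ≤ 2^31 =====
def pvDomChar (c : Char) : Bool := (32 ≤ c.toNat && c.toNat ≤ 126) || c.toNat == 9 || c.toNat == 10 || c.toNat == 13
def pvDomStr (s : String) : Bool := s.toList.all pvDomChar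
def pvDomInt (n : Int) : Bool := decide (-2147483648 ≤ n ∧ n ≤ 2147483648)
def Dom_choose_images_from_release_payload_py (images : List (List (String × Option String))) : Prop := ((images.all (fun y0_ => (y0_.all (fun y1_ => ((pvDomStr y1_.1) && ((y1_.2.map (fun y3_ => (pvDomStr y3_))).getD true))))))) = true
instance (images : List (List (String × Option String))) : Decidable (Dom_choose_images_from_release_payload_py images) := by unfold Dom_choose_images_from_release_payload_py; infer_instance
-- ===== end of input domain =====

-- B replaces A's three full filter passes by ONE left-to-right pass keeping first-primary /
-- first-hinted / first-secondary references (objective: simpler single-pass decomposition).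

-- ===== PORT A =====
-- img.get(k) for a dict[str, Optional[str]]: missing key and stored None both give none
def pvA_get (img : List (String × Option String)) (k : String) : Option String :=
  PySem.Dict.getD (PySem.Dict.mk img) k none

-- Python `x or y` on Optional[str]: None and "" are falsy
def pvA_or (a b : Option String) : Option String :=
  match a with
  | some s => if s = "" then b else some s
  | none => b

def pvA_looks_back (img : List (String × Option String)) : Bool :=
  let s := PySem.Str.lower ((pvA_or (pvA_or (pvA_get img "resource_url") (pvA_get img "uri")) (some "")).getD "")
  PySem.Str.isIn "back" s || PySem.Str.isIn "rear" s

def choose_images_from_release_payload_py (images : List (List (String × Option String))) : Option String × Option String :=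
  match images with
  | [] => (none, none)
  | first :: _ =>
    let primaries := images.filter (fun img => pvA_get img "type" == some "primary")
    let front :=
      match primaries with
      | p :: _ => pvA_or (pvA_get p "resource_url") (pvA_get p "uri")
      | [] => pvA_or (pvA_get first "resource_url") (pvA_get first "uri")
    let back_url :=
      match images.filter (fun img => pvA_looks_back img) with
      | h :: _ => pvA_or (pvA_get h "resource_url") (pvA_get h "uri")
      | [] =>
        match images.filter (fun img => pvA_get img "type" == some "secondary") with
        | s :: _ => pvA_or (pvA_get s "resource_url") (pvA_get s "uri")
        | [] => none
    (front, back_url)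

-- ===== PORT B =====
def pvB_get (img : List (String × Option String)) (k : String) : Option String :=
  PySem.Dict.getD (PySem.Dict.mk img) k none

def pvB_or (a b : Option String) : Option String :=
  match a with
  | some s => if s = "" then b else some s
  | none => b

def pvB_hint (img : List (String × Option String)) : Bool :=
  let s := PySem.Str.lower ((pvB_or (pvB_or (pvB_get img "resource_url") (pvB_get img "uri")) (some "")).getD "")
  PySem.Str.isIn "back" s || PySem.Str.isIn "rear" s

def pvB_url (img : List (String × Option String)) : Option String :=
  pvB_or (pvB_get img "resource_url") (pvB_get img "uri")

-- one step of B's single pass: fill each of the three slots the first time its test fires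
def pvB_step
    (st : Option (List (String × Option String)) × Option (List (String × Option String)) × Option (List (String × Option String)))
    (img : List (String × Option String)) :
    Option (List (String × Option String)) × Option (List (String × Option String)) × Option (List (String × Option String)) :=
  let (p, h, s) := st
  let t := pvB_get img "type"
  let p := if p.isNone && t == some "primary" then some img else p
  let h := if h.isNone && pvB_hint img then some img else h
  let s := if s.isNone && t == some "secondary" then some img else s
  (p, h, s)

def choose_images_from_release_payload_py_alt (images : List (List (String × Option String))) : Option String × Option String :=
  match images with
  | [] => (none, none)
  | first :: _ =>
    let (p, h, s) := images.foldl pvB_step (none, none, none)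
    let front := pvB_url (p.getD first)
    let back_url :=
      match h with
      | some i => pvB_url i
      | none =>
        match s with
        | some i => pvB_url i
        | none => none
    (front, back_url)

-- ===== PRECONDITION & SPEC =====
def Spec_choose_images_from_release_payload_py (images : List (List (String × Option String))) (out : Option String × Option String) : Prop := out = choose_images_from_release_payload_py_alt images
instance (images : List (List (String × Option String))) (out : Option String × Option String) : Decidable (Spec_choose_images_from_release_payload_py images out) := by unfold Spec_choose_images_from_release_payload_py; infer_instance

-- ===== CLAIM (what is proved, stated in full; the proofs are below) =====
def Claim_equal_choose_images_from_release_payload_py : Prop := ∀ (images : List (List (String × Option String))), Dom_choose_images_from_release_payload_py images → Spec_choose_images_from_release_payload_py images (choose_images_from_release_payload_py images)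

-- ===== LEMMAS AND PROOFS =====

-- first-match accumulator for one slot
def pvFirst (q : List (String × Option String) → Bool)
    (xs : List (List (String × Option String))) (a : Option (List (String × Option String))) :
    Option (List (String × Option String)) :=
  xs.foldl (fun a x => if a.isNone && q x then some x else a) a

theorem pvFirst_some (q) (xs) (v) : pvFirst q xs (some v) = some v := by
  induction xs with
  | nil => rfl
  | cons x xs ih => simpa [pvFirst, List.foldl] using ih

theorem pvFirst_eq_filter_head (q) (xs) :
    pvFirst q xs none = (xs.filter q).head? := by
  induction xs with
  | nil => rfl
  | cons x xs ih =>
    by_cases h : q x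
    · simpa [pvFirst, List.foldl, h] using pvFirst_some q xs x
    · simpa [pvFirst, List.foldl, h] using ih

theorem pvFold_triple (xs) (p h s) :
    xs.foldl pvB_step (p, h, s) =
      (pvFirst (fun img => pvB_get img "type" == some "primary") xs p,
       pvFirst (fun img => pvB_hint img) xs h,
       pvFirst (fun img => pvB_get img "type" == some "secondary") xs s) := by
  induction xs generalizing p h s with
  | nil => rfl
  | cons x xs ih => simp [List.foldl, pvB_step, pvFirst, ih]

-- ===== VERDICT (by name: the statement is the Claim_ definition above) =====
theorem choose_images_from_release_payload_py_spec : Claim_equal_choose_images_from_release_payload_py := by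
  intro images _
  unfold Spec_choose_images_from_release_payload_py
  match images with
  | [] => rfl
  | first :: rest =>
    show choose_images_from_release_payload_py (first :: rest) = _
    rw [choose_images_from_release_payload_py_alt]
    rw [pvFold_triple, pvFirst_eq_filter_head, pvFirst_eq_filter_head, pvFirst_eq_filter_head]
    rw [choose_images_from_release_payload_py]
    have hAB : ∀ a b, pvA_or a b = pvB_or a b := fun a b => rfl
    have hget : ∀ i k, pvA_get i k = pvB_get i k := fun i k => rfl
    have hhint : ∀ i, pvA_looks_back i = pvB_hint i := fun i => rfl
    simp only [hAB, hget, hhint]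
    rcases hP : List.filter (fun img => pvB_get img "type" == some "primary") (first :: rest) with _ | ⟨p, ps⟩ <;>
    rcases hH : List.filter (fun img => pvB_hint img) (first :: rest) with _ | ⟨h, hs'⟩ <;>
    rcases hS : List.filter (fun img => pvB_get img "type" == some "secondary") (first :: rest) with _ | ⟨s, ss⟩ <;>
    simp [hP, hH, hS, pvB_url]
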